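-- pv_equiv track=rewrite | github.com/efbaro/CDadosSeg | T2/Parte1/manifest_script.py | get_lista_permissoes_unicas
-- ===== SOURCE A (Python) =====
-- def get_lista_permissoes_unicas(dic):
--     """
--     Retorna lista que as permissões e ocorrem em somente uma aplicação
--
--     Parameters
--     ----------
--     dic : dict
--         Dicionário em que a chave é o nome da aplicação, e o valor
--         é a lista de permissões.
--
--     Returns
--     -------
--     list
--         lista com as permissões e ocorrem em somente uma aplicação
--     """
--     # Conta para cada permissão a quantidade do ocorrências
--     dic_count = {}
--     for key, values in dic.items():
--         for value in values:
--             if value in dic_count.keys():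
--                 dic_count[value] += 1
--             else:
--                 dic_count[value] = 1
--
--     # Adiciona a lista as permissões que ocorreram somente uma vez
--     permissoes_unicas = []
--     for key, value in dic_count.items():
--         if value == 1:
--             permissoes_unicas.append(key)
--
--     return permissoes_unicas
-- ===== SOURCE B (Python) =====
-- def get_lista_permissoes_unicas(dic):
--     # One pass: keep an order-preserving dict of permissions seen exactly once so far.
--     seen = set()
--     unique = {}
--     for values in dic.values():
--         for v in values:
--             if v in seen:
--                 unique.pop(v, None)
--             else:
--                 seen.add(v)
--                 unique[v] = None
--     return list(unique)
-- ===== Notes on version B (the rewrite author's own statement) =====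
-- stated objective: alternative
-- what changed: Replaces A's count-then-filter two-phase (build a full occurrence-count dict, then a second loop collecting keys with count 1) by a single pass that maintains a seen-set and an ordered dict of still-unique permissions, popping a permission the moment it is seen again.
import Mathlib
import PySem

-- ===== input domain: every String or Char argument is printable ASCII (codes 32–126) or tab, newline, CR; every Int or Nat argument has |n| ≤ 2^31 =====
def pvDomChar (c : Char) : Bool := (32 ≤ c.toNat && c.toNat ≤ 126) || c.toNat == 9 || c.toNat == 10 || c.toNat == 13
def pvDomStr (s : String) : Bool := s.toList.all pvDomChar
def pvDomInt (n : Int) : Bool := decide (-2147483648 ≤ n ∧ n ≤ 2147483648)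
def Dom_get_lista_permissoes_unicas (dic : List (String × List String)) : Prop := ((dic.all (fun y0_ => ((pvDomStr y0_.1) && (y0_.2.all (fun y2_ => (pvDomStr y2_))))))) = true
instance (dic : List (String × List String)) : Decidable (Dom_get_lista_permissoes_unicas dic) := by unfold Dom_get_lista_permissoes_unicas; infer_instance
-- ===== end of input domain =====

-- B replaces A's count-then-filter two-phase by a single pass keeping an ordered dict of
-- still-unique permissions (objective: alternative decomposition, same cost).

-- ===== PORT A =====
-- count every permission, then collect those counted exactly once (two loops, as in A)
def get_lista_permissoes_unicas (dic : List (String × List String)) : List String :=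
  let dic_count : PySem.Dict String Int :=
    dic.foldl (fun d kv =>
      kv.2.foldl (fun d v =>
        if d.contains v then d.insert v (d.getD v 0 + 1) else d.insert v 1) d)
      PySem.Dict.empty
  dic_count.items.foldl (fun acc p => if p.2 = 1 then acc ++ [p.1] else acc) []

-- ===== PORT B =====
-- one pass: seen-set plus ordered dict of permissions seen exactly once so far
def get_lista_permissoes_unicas_alt (dic : List (String × List String)) : List String :=
  let st : PySem.Set String × PySem.Dict String Unit :=
    dic.foldl (fun st kv =>
      kv.2.foldl (fun st v =>
        if PySem.Set.contains st.1 v then (st.1, st.2.erase v)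
        else (PySem.Set.add st.1 v, st.2.insert v ())) st)
      (PySem.Set.empty, PySem.Dict.empty)
  st.2.keys

-- ===== PRECONDITION & SPEC =====
def Spec_get_lista_permissoes_unicas (dic : List (String × List String)) (out : List String) : Prop := out = get_lista_permissoes_unicas_alt dic
instance (dic : List (String × List String)) (out : List String) : Decidable (Spec_get_lista_permissoes_unicas dic out) := by unfold Spec_get_lista_permissoes_unicas; infer_instance

-- ===== CLAIM (what is proved, stated in full; the proofs are below) =====
def Claim_equal_get_lista_permissoes_unicas : Prop := ∀ (dic : List (String × List String)), Dom_get_lista_permissoes_unicas dic → Spec_get_lista_permissoes_unicas dic (get_lista_permissoes_unicas dic)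

-- ===== LEMMAS AND PROOFS =====

-- the dict B maintains after processing the flattened prefix `p`
def pvUniqDict (p : List String) : PySem.Dict String Unit :=
  PySem.Dict.mk (((PySem.Set.ofList p).filter (fun k => p.count k == 1)).map (fun k => (k, ())))

-- A's counting loop is the standard counter
theorem pvCountA_eq_counter (vs : List String) :
    vs.foldl (fun d v =>
        if d.contains v then d.insert v (d.getD v 0 + 1) else d.insert v 1) PySem.Dict.empty
      = PySem.Dict.counter vs := by
  rw [← PySem.Dict.foldl_insert_getD_add_one_eq_counter]
  congr 1
  funext d v
  by_cases h : d.contains v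
  · simp [h]
  · simp only [Bool.not_eq_true] at h
    simp [h, PySem.Dict.getD_of_not_contains d 0 h]

theorem pvSet_ofList_append_singleton (p : List String) (v : String) :
    PySem.Set.ofList (p ++ [v]) = PySem.Set.add (PySem.Set.ofList p) v := by
  simp [PySem.Set.ofList_eq_foldl, List.foldl_append]

-- one step of B's loop advances the invariant state
theorem pvStepB (p : List String) (v : String) :
    (if PySem.Set.contains (PySem.Set.ofList p) v
        then (PySem.Set.ofList p, (pvUniqDict p).erase v)
        else (PySem.Set.add (PySem.Set.ofList p) v, (pvUniqDict p).insert v ()))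
      = (PySem.Set.ofList (p ++ [v]), pvUniqDict (p ++ [v])) := by
  by_cases hv : v ∈ p
  · have hc : PySem.Set.contains (PySem.Set.ofList p) v = true := by
      simp [PySem.Set.contains, PySem.Set.mem_ofList, hv]
    have hset : PySem.Set.ofList (p ++ [v]) = PySem.Set.ofList p := by
      rw [pvSet_ofList_append_singleton]
      simp [PySem.Set.add, PySem.Set.contains, PySem.Set.mem_ofList, hv]
    have hdict : (pvUniqDict p).erase v = pvUniqDict (p ++ [v]) := by
      simp only [pvUniqDict, PySem.Dict.erase, hset, List.filter_map, List.filter_filter]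
      congr 1
      congr 1
      apply List.filter_congr
      intro k hk
      by_cases hkv : k = v
      · subst hkv
        have h1 : 1 ≤ p.count k := List.one_le_count_iff.mpr hv
        simp only [List.count_append, List.count_singleton]
        simp [Function.comp]
        omega
      · simp only [List.count_append, List.count_singleton, Function.comp]
        simp [hkv, Ne.symm hkv]
    simp only [hc, if_true]
    rw [hset, hdict]
  · have hc : PySem.Set.contains (PySem.Set.ofList p) v = false := by
      simp [PySem.Set.contains, PySem.Set.mem_ofList, hv]
    have hset : PySem.Set.ofList (p ++ [v]) = PySem.Set.ofList p ++ [v] := by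
      rw [pvSet_ofList_append_singleton]
      simp [PySem.Set.add, PySem.Set.contains, PySem.Set.mem_ofList, hv]
    have hnc : (pvUniqDict p).contains v = false := by
      simp only [pvUniqDict, PySem.Dict.contains_mk, List.any_eq_false]
      intro q hq
      simp only [List.mem_map, List.mem_filter] at hq
      obtain ⟨k, ⟨hk, _⟩, rfl⟩ := hq
      have hkp : k ∈ p := (PySem.Set.mem_ofList p k).mp hk
      have hkv : k ≠ v := by rintro rfl; exact hv hkp
      simp [hkv]
    have hdict : (pvUniqDict p).insert v () = pvUniqDict (p ++ [v]) := by
      apply PySem.Dict.ext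
      rw [PySem.Dict.items_insert_of_not_contains _ _ hnc]
      simp only [pvUniqDict, hset, List.filter_append]
      have h1 : (PySem.Set.ofList p).filter (fun k => (p ++ [v]).count k == 1)
          = (PySem.Set.ofList p).filter (fun k => p.count k == 1) := by
        apply List.filter_congr
        intro k hk
        have hkp : k ∈ p := (PySem.Set.mem_ofList p k).mp hk
        have hkv : k ≠ v := by rintro rfl; exact hv hkp
        simp [List.count_append, Ne.symm hkv]
      have h2 : List.filter (fun k => (p ++ [v]).count k == 1) [v] = [v] := by
        have : v ∉ p := hv
        simp [List.count_append, List.count_singleton, List.count_eq_zero.mpr this]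
      rw [h1, h2]
      simp
    have hadd : (PySem.Set.ofList p).add v = PySem.Set.ofList p ++ [v] := by
      rw [← pvSet_ofList_append_singleton, hset]
    simp only [hc, Bool.false_eq_true, if_false]
    rw [hadd, hdict, hset]

-- B's inner loop over the remaining flattened values, from any reachable state
theorem pvLoopB (rest : List String) : ∀ (p : List String),
    rest.foldl (fun st v =>
        if PySem.Set.contains st.1 v then (st.1, st.2.erase v)
        else (PySem.Set.add st.1 v, st.2.insert v ()))
      (PySem.Set.ofList p, pvUniqDict p)
      = (PySem.Set.ofList (p ++ rest), pvUniqDict (p ++ rest)) := by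
  induction rest with
  | nil => intro p; simp
  | cons v rest ih =>
    intro p
    rw [List.foldl_cons]
    have h := pvStepB p v
    simp only at h
    rw [h, ih (p ++ [v])]
    simp

-- ===== VERDICT (by name: the statement is the Claim_ definition above) =====
theorem get_lista_permissoes_unicas_spec : Claim_equal_get_lista_permissoes_unicas := by
  unfold Claim_equal_get_lista_permissoes_unicas
  intro dic _
  unfold Spec_get_lista_permissoes_unicas
  unfold get_lista_permissoes_unicas get_lista_permissoes_unicas_alt
  simp only [← List.foldl_flatMap]
  set vs := dic.flatMap (·.2) with hvs
  rw [pvCountA_eq_counter, PySem.Dict.items_counter]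
  have hB : vs.foldl (fun st v =>
        if PySem.Set.contains st.1 v then (st.1, st.2.erase v)
        else (PySem.Set.add st.1 v, st.2.insert v ()))
      (PySem.Set.empty, PySem.Dict.empty)
      = (PySem.Set.ofList vs, pvUniqDict vs) := by
    have h0 : (PySem.Set.empty, (PySem.Dict.empty : PySem.Dict String Unit))
        = (PySem.Set.ofList ([] : List String), pvUniqDict []) := rfl
    rw [h0, pvLoopB vs []]
    simp
  rw [hB]
  have hfif := PySem.List.foldl_append_if (fun p : String × Int => decide (p.2 = 1))
    (fun p => p.1) ((PySem.Set.ofList vs).map (fun k => (k, (vs.count k : Int)))) []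
  simp only [decide_eq_true_eq] at hfif
  rw [hfif]
  simp only [pvUniqDict, PySem.Dict.keys_mk, List.map_map, List.nil_append, List.filter_map,
    Function.comp_def]
  congr 1
  apply List.filter_congr
  intro k _
  simp only [Nat.cast_eq_one, beq_eq_decide]
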